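-- pv_equiv track=rewrite | github.com/NETWAYS/ingraph | ingraph/api.py | _optimizePlot
-- ===== SOURCE A (Python) =====
-- def _optimizePlot(plot):
--     prev = None
--     same = False
--     result = []
--
--     for nvpair in plot:
--         if prev != None and prev[1] == nvpair[1]:
--             same = True
--         elif prev == None or same:
--             same = False
--             result.append({'x': nvpair[0], 'y': nvpair[1]})
--         else:
--             result.append({'y': nvpair[1]})
--
--         prev = nvpair
--
--     return result
-- ===== SOURCE B (Python) =====
-- def _optimizePlot(plot):
--     # Phase 1: split into runs of consecutive equal y: list of (first_point, run_length).
--     runs = []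
--     rest = plot
--     while rest:
--         first = rest[0]
--         k = 1
--         while k < len(rest) and rest[k][1] == first[1]:
--             k += 1
--         runs.append((first, k))
--         rest = rest[k:]
--     # Phase 2: emit one point per run; x is included iff the PREVIOUS run had length >= 2
--     # (the first run always includes x).
--     result = []
--     prev_len = 2
--     for first, length in runs:
--         if prev_len >= 2:
--             result.append({'x': first[0], 'y': first[1]})
--         else:
--             result.append({'y': first[1]})
--         prev_len = length
--     return result
-- ===== Notes on version B (the rewrite author's own statement) =====
-- stated objective: alternative
-- what changed: B replaces A's single stateful pass (prev/same flags) by a two-phase algorithm: first split the input into runs of consecutive equal y with an index scan, then emit one point per run, including x iff the previous run had length >= 2.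
import Mathlib
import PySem

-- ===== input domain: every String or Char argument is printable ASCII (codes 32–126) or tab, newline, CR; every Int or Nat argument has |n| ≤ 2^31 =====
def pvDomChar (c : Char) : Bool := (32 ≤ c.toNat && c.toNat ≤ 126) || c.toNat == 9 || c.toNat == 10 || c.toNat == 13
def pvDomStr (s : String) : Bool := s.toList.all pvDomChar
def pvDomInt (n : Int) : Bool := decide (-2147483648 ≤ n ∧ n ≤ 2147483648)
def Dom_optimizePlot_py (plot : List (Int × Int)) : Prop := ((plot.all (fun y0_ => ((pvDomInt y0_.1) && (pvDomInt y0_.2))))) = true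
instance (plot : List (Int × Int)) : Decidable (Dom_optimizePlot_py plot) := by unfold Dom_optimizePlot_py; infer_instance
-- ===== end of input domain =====

-- B splits the plot into runs of consecutive equal y and emits one point per run
-- (x included iff the previous run had length ≥ 2) instead of A's single stateful pass.

-- ===== PORT A =====
-- A's loop over `plot` with state (prev, same, result), transcribed as structural recursion.
def optimizePlot_A_loop (prev : Option (Int × Int)) (same : Bool)
    (result : List (List (String × Int))) : List (Int × Int) → List (List (String × Int))
  | [] => result
  | nvpair :: rest =>
    if (match prev with | some p => p.2 == nvpair.2 | none => false) then
      optimizePlot_A_loop (some nvpair) true result rest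
    else if prev.isNone || same then
      optimizePlot_A_loop (some nvpair) false
        (result ++ [[("x", nvpair.1), ("y", nvpair.2)]]) rest
    else
      optimizePlot_A_loop (some nvpair) false (result ++ [[("y", nvpair.2)]]) rest

def optimizePlot_py (plot : List (Int × Int)) : List (List (String × Int)) :=
  optimizePlot_A_loop none false [] plot

-- ===== PORT B =====
-- Phase 1 of Source B: split the plot into runs of consecutive equal y, as (first point, length).
def optimizePlot_B_runs : List (Int × Int) → List ((Int × Int) × Nat)
  | [] => []
  | x :: xs =>
    (x, (xs.takeWhile (fun q => q.2 == x.2)).length + 1) ::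
      optimizePlot_B_runs (xs.dropWhile (fun q => q.2 == x.2))
termination_by l => l.length
decreasing_by
  simp only [List.length_cons]
  have := List.length_dropWhile_le (fun q => q.2 == x.2) xs
  omega

-- Phase 2 of Source B: emit one point per run, carrying the previous run's length.
def optimizePlot_B_emit : Nat → List ((Int × Int) × Nat) → List (List (String × Int))
  | _, [] => []
  | prevLen, (first, len) :: rest =>
    (if 2 ≤ prevLen then [("x", first.1), ("y", first.2)] else [("y", first.2)])
      :: optimizePlot_B_emit len rest

def optimizePlot_py_alt (plot : List (Int × Int)) : List (List (String × Int)) :=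
  optimizePlot_B_emit 2 (optimizePlot_B_runs plot)

-- ===== PRECONDITION & SPEC =====
def Spec_optimizePlot_py (plot : List (Int × Int)) (out : List (List (String × Int))) : Prop := out = optimizePlot_py_alt plot
instance (plot : List (Int × Int)) (out : List (List (String × Int))) : Decidable (Spec_optimizePlot_py plot out) := by unfold Spec_optimizePlot_py; infer_instance

-- ===== CLAIM (what is proved, stated in full; the proofs are below) =====
def Claim_equal_optimizePlot_py : Prop := ∀ (plot : List (Int × Int)), Dom_optimizePlot_py plot → Spec_optimizePlot_py plot (optimizePlot_py plot)

-- ===== LEMMAS AND PROOFS =====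

-- Main invariant: A's loop from state (some f, s) equals acc ++ B's emission of the
-- remaining runs, where the flag "previous run long" is s ∨ (f's run continues).
theorem optimizePlot_loop_eq (n : Nat) :
    ∀ (rest : List (Int × Int)), rest.length ≤ n →
    ∀ (f : Int × Int) (s : Bool) (acc : List (List (String × Int))) (m : Nat),
      ((s = true ∨ rest.takeWhile (fun q => q.2 == f.2) ≠ []) ↔ 2 ≤ m) →
      optimizePlot_A_loop (some f) s acc rest =
        acc ++ optimizePlot_B_emit m
          (optimizePlot_B_runs (rest.dropWhile (fun q => q.2 == f.2))) := by
  induction n with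
  | zero =>
    intro rest hlen f s acc m hm
    have : rest = [] := List.eq_nil_of_length_eq_zero (Nat.le_zero.mp hlen)
    subst this
    simp [optimizePlot_A_loop, optimizePlot_B_runs, optimizePlot_B_emit]
  | succ n ih =>
    intro rest hlen f s acc m hm
    cases rest with
    | nil => simp [optimizePlot_A_loop, optimizePlot_B_runs, optimizePlot_B_emit]
    | cons q r2 =>
      have hlen2 : r2.length ≤ n := by
        simpa using Nat.lt_succ_iff.mp (Nat.lt_of_lt_of_le (by simp) hlen)
      by_cases hq : q.2 = f.2
      · -- q continues f's run
        have hbA : (f.2 == q.2) = true := by simp [hq]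
        have hb : (q.2 == f.2) = true := by simp [hq]
        have hpred : (fun p : Int × Int => p.2 == q.2) = (fun p => p.2 == f.2) := by
          funext p; simp [hq]
        have hA : optimizePlot_A_loop (some f) s acc (q :: r2) =
            optimizePlot_A_loop (some q) true acc r2 := by
          simp [optimizePlot_A_loop, hbA]
        have htw : (q :: r2).takeWhile (fun p => p.2 == f.2)
            = q :: r2.takeWhile (fun p => p.2 == f.2) := by
          simp [hb]
        have hdw : (q :: r2).dropWhile (fun p => p.2 == f.2)
            = r2.dropWhile (fun p => p.2 == f.2) := by
          simp [hb]
        have h2m : 2 ≤ m := hm.mp (Or.inr (by simp [htw]))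
        rw [hA, ih r2 hlen2 q true acc m
          ⟨fun _ => h2m, fun _ => Or.inl rfl⟩]
        rw [hdw, hpred]
      · -- q starts a new run
        have hbA : (f.2 == q.2) = false := by
          simp only [beq_eq_false_iff_ne, ne_eq]
          exact fun h => hq h.symm
        have hb : (q.2 == f.2) = false := by
          simp only [beq_eq_false_iff_ne, ne_eq]
          exact hq
        have htw : (q :: r2).takeWhile (fun p => p.2 == f.2) = [] := by
          simp [hb]
        have hdw : (q :: r2).dropWhile (fun p => p.2 == f.2) = q :: r2 := by
          simp [hb]
        have hruns : optimizePlot_B_runs ((q :: r2).dropWhile (fun p => p.2 == f.2))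
            = (q, (r2.takeWhile (fun p => p.2 == q.2)).length + 1) ::
              optimizePlot_B_runs (r2.dropWhile (fun p => p.2 == q.2)) := by
          rw [hdw]; rw [optimizePlot_B_runs]
        have hflag : ((false = true ∨ r2.takeWhile (fun p => p.2 == q.2) ≠ []) ↔
            2 ≤ (r2.takeWhile (fun p => p.2 == q.2)).length + 1) := by
          constructor
          · rintro (h | h)
            · cases h
            · have := List.length_pos_of_ne_nil h
              omega
          · intro h
            right
            intro hnil
            rw [hnil] at h
            simp at h
        cases s with
        | true =>
          have hA : optimizePlot_A_loop (some f) true acc (q :: r2) =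
              optimizePlot_A_loop (some q) false
                (acc ++ [[("x", q.1), ("y", q.2)]]) r2 := by
            simp [optimizePlot_A_loop, hbA]
          rw [hA, ih r2 hlen2 q false (acc ++ [[("x", q.1), ("y", q.2)]]) _ hflag]
          have h2m : 2 ≤ m := hm.mp (Or.inl rfl)
          rw [hruns]
          simp [optimizePlot_B_emit, h2m]
        | false =>
          have hA : optimizePlot_A_loop (some f) false acc (q :: r2) =
              optimizePlot_A_loop (some q) false (acc ++ [[("y", q.2)]]) r2 := by
            simp [optimizePlot_A_loop, hbA]
          rw [hA, ih r2 hlen2 q false (acc ++ [[("y", q.2)]]) _ hflag]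
          have h2m : ¬ 2 ≤ m := by
            intro h
            rcases hm.mpr h with h' | h'
            · cases h'
            · exact h' htw
          rw [hruns]
          simp [optimizePlot_B_emit, h2m]

-- ===== VERDICT (by name: the statement is the Claim_ definition above) =====
theorem optimizePlot_py_spec : Claim_equal_optimizePlot_py := by
  intro plot _
  unfold Spec_optimizePlot_py optimizePlot_py optimizePlot_py_alt
  cases plot with
  | nil => simp [optimizePlot_A_loop, optimizePlot_B_runs, optimizePlot_B_emit]
  | cons f rest =>
    have hA : optimizePlot_A_loop none false [] (f :: rest) =
        optimizePlot_A_loop (some f) false [[("x", f.1), ("y", f.2)]] rest := by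
      simp [optimizePlot_A_loop]
    have hflag : ((false = true ∨ rest.takeWhile (fun q => q.2 == f.2) ≠ []) ↔
        2 ≤ (rest.takeWhile (fun q => q.2 == f.2)).length + 1) := by
      constructor
      · rintro (h | h)
        · cases h
        · have := List.length_pos_of_ne_nil h
          omega
      · intro h
        right
        intro hnil
        rw [hnil] at h
        simp at h
    rw [hA, optimizePlot_loop_eq rest.length rest le_rfl f false _ _ hflag]
    rw [optimizePlot_B_runs]
    simp [optimizePlot_B_emit]
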